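-- pv_equiv track=rewrite | github.com/weedmo/programmers_backjun_solution | 프로그래머스/2/42587. 프로세스/프로세스.py | solution
-- ===== SOURCE A (Python) =====
-- def solution(priorities, location):
--     q = priorities
--     i, count = 0, 0
--     while q[location] != 0:
--         if q[i] != 0 and max(q) <= q[i]:
--             q[i] = 0
--             count += 1
--         i = (i+1) % len(priorities)
--
--     return count
-- ===== SOURCE B (Python) =====
-- def solution(priorities, location):
--     # One loop iteration per executed process: jump straight to the next
--     # process with maximal priority (cyclically) instead of stepping index
--     # by index; zeroes the same entries of `priorities` in place as A does.
--     q = priorities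
--     n = len(q)
--     loc = location % n
--     if q[loc] == 0:
--         return 0
--     s, count = 0, 0
--     while True:
--         m = max(q)
--         j = next(k % n for k in range(s, s + n) if q[k % n] == m)
--         q[j] = 0
--         count += 1
--         if j == loc:
--             return count
--         s = (j + 1) % n
-- ===== Notes on version B (the rewrite author's own statement) =====
-- stated objective: alternative
-- what changed: Instead of A's tick-by-tick circular scan that recomputes max(q) at every single index step, B performs one loop iteration per executed process, jumping directly to the first remaining element (cyclically from the last execution point) that holds the maximum.
-- outside the precondition, e.g. on solution([-1], 0): A returns 1, B returns 1; on solution([-2, -1], 1): A returns 1, B returns 1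
import Mathlib
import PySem

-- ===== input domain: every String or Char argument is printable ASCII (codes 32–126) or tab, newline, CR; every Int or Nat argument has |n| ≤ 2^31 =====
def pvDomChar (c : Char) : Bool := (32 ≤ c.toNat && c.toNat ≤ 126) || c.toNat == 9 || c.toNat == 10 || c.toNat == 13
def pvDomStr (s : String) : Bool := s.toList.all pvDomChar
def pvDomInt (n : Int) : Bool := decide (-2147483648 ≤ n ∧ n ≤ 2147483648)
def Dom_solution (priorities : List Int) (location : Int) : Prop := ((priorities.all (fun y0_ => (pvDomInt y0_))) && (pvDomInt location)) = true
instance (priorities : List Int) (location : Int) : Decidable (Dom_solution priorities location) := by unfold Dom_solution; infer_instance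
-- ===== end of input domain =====

-- B replaces A's tick-by-tick circular scan (max(q) recomputed at every single index
-- step) by one loop iteration per executed process that jumps straight to the next
-- maximal element.  The equivalence proved is about the return value; both programs
-- zero the same entries of `priorities` in place.

-- ===== PORT A =====
-- A's while loop, fuel-bounded: each iteration checks q[location], then possibly zeroes
-- q[i] when it holds the maximum, then advances i = (i+1) % len(q).  `none` = fuel ran
-- out (never happens inside Pre_) or a raising q[location] (excluded by Pre_).
def solLoopA (location : Int) (q : List Int) (i : Nat) (count : Int) : Nat → Option Int
  | 0 => none
  | fuel+1 =>
    match PySem.List.pyGet? q location with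
    | none => none                        -- IndexError on q[location]
    | some v =>
      if v ≠ 0 then
        match PySem.List.max? q (fun x => x) with
        | none => none                    -- max([]) ValueError (unreachable: q ≠ [])
        | some m =>
          if PySem.List.pyGetD q (i : Int) 0 ≠ 0 ∧ m ≤ PySem.List.pyGetD q (i : Int) 0 then
            solLoopA location (PySem.List.pySetD q (i : Int) 0) ((i+1) % q.length) (count+1) fuel
          else
            solLoopA location q ((i+1) % q.length) count fuel
      else some count

def solution (priorities : List Int) (location : Int) : Int :=
  (solLoopA location priorities 0 0 ((priorities.length + 1) * (priorities.length + 1))).getD 0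

-- ===== PORT B =====
-- next(k % n for k in range(s, s + n) if q[k % n] == m)
def findFrom (q : List Int) (m : Int) (n : Nat) (k : Nat) : Nat → Option Nat
  | 0 => none                             -- generator exhausted (unreachable: m ∈ q)
  | rem+1 =>
    if PySem.List.pyGetD q ((k % n : Nat) : Int) 0 = m then some (k % n)
    else findFrom q m n (k+1) rem

-- B's while True loop: one iteration per executed process.
def solLoopB (loc : Nat) (q : List Int) (s : Nat) (count : Int) : Nat → Option Int
  | 0 => none
  | fuel+1 =>
    match PySem.List.max? q (fun x => x) with
    | none => none
    | some m =>
      match findFrom q m q.length s q.length with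
      | none => none
      | some j =>
        if j = loc then some (count + 1)
        else solLoopB loc (PySem.List.pySetD q (j : Int) 0) ((j+1) % q.length) (count+1) fuel

def solution_alt (priorities : List Int) (location : Int) : Int :=
  let n := priorities.length
  match PySem.Int.mod? location (n : Int) with
  | none => 0                             -- ZeroDivisionError on location % 0 (excluded by Pre_)
  | some locI =>
    let loc := locI.toNat
    if PySem.List.pyGetD priorities (loc : Int) 0 = 0 then 0
    else (solLoopB loc priorities 0 0 (n + 1)).getD 0

-- ===== PRECONDITION & SPEC =====
-- Pre_ excludes inputs where A raises (empty list / out-of-range location) and inputs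
-- whose target priority is negative: on those A diverges, except on the degenerate
-- corner where the target is the first maximum of an all-negative list (see claim cites).
def Pre_solution (priorities : List Int) (location : Int) : Prop :=
  priorities ≠ [] ∧ PySem.Raise.InRange priorities.length location ∧
    0 ≤ PySem.List.pyGetD priorities location 0
instance (priorities : List Int) (location : Int) : Decidable (Pre_solution priorities location) := by
  unfold Pre_solution; infer_instance

def pvWitness_solution : List Int × Int := ([2, 1, 3, 2], 2)

def Spec_solution (priorities : List Int) (location : Int) (out : Int) : Prop := out = solution_alt priorities location
instance (priorities : List Int) (location : Int) (out : Int) : Decidable (Spec_solution priorities location out) := by unfold Spec_solution; infer_instance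

-- ===== CLAIM (what is proved, stated in full; the proofs are below) =====
def Claim_equal_solution : Prop := ∀ (priorities : List Int) (location : Int), Dom_solution priorities location → Pre_solution priorities location → Spec_solution priorities location (solution priorities location)

-- ===== LEMMAS AND PROOFS =====

-- the wrapped Nat index that q[location] denotes, for -len(q) ≤ location < len(q)
lemma pyGet_wrap (q : List Int) (location : Int)
    (h : PySem.Raise.InRange q.length location) :
    ∃ w : Nat, w < q.length ∧ (PySem.Int.mod location (q.length : Int)).toNat = w ∧
      ∀ q' : List Int, q'.length = q.length → PySem.List.pyGet? q' location = q'[w]? := by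
  have hr : -(q.length : Int) ≤ location ∧ location < q.length := by
    simpa [PySem.Raise.InRange] using h
  have hn : 0 < q.length := by omega
  rcases le_or_gt 0 location with hl | hl
  · refine ⟨location.toNat, by omega, ?_, ?_⟩
    · rw [PySem.Int.mod_eq_emod_of_pos (by exact_mod_cast hn)]
      rw [Int.emod_eq_of_lt hl (by exact_mod_cast hr.2)]
    · intro q' hq'
      rw [PySem.List.pyGet?_of_nonneg q' hl]
  · refine ⟨q.length - (-location).toNat, by omega, ?_, ?_⟩
    · rw [PySem.Int.mod_eq_emod_of_pos (by exact_mod_cast hn)]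
      have : location % (q.length : Int) = location + q.length := by
        rw [← Int.add_mul_emod_self_left (c := 1)]
        rw [Int.emod_eq_of_lt (by omega) (by omega)]
        ring_nf
      rw [this]; omega
    · intro q' hq'
      have hloc : location = -(((-location).toNat : Nat) : Int) := by omega
      rw [hloc, PySem.List.pyGet?_neg_natCast q' _ (by omega) (by omega), hq']
      congr 1
      omega

-- B's generator: with no hit at offsets < d and a hit at offset d < rem,
-- findFrom returns the hit index
lemma findFrom_hit (q : List Int) (m : Int) (n : Nat) :
    ∀ (d k rem : Nat), d < rem →
      (∀ t < d, q.getD ((k + t) % n) 0 ≠ m) → q.getD ((k + d) % n) 0 = m →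
      findFrom q m n k rem = some ((k + d) % n) := by
  intro d
  induction d with
  | zero =>
    intro k rem hrem hno hhit
    obtain ⟨r, rfl⟩ : ∃ r, rem = r + 1 := ⟨rem - 1, by omega⟩
    simp only [Nat.add_zero] at hhit
    rw [List.getD_eq_getElem?_getD] at hhit
    simp only [findFrom, PySem.List.pyGetD_natCast, List.getD_eq_getElem?_getD]
    simp [hhit]
  | succ d ih =>
    intro k rem hrem hno hhit
    obtain ⟨r, rfl⟩ : ∃ r, rem = r + 1 := ⟨rem - 1, by omega⟩
    simp only [findFrom, PySem.List.pyGetD_natCast, List.getD_eq_getElem?_getD]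
    have h0 : ¬ q.getD (k % n) 0 = m := by
      have := hno 0 (by omega); simpa using this
    rw [List.getD_eq_getElem?_getD] at h0
    rw [if_neg h0]
    have e : k + 1 + d = k + (d + 1) := by omega
    rw [show k + (d+1) = k + 1 + d from by omega]
    exact ih (k+1) r (by omega) (fun t ht => by
      have := hno (t+1) (by omega)
      simpa [Nat.add_assoc, Nat.add_comm 1 t] using this) (by rw [e]; exact hhit)

-- A walks d no-hit steps without touching q or count
lemma solLoopA_skip (location : Int) (q : List Int) (v m : Int)
    (hget : PySem.List.pyGet? q location = some v) (hv : v ≠ 0)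
    (hmax : PySem.List.max? q (fun x => x) = some m) :
    ∀ (d i count f), i < q.length → (∀ t < d, q.getD ((i + t) % q.length) 0 ≠ m) →
      solLoopA location q i count (d + f) = solLoopA location q ((i + d) % q.length) count f := by
  intro d
  induction d with
  | zero =>
    intro i count f hi _
    rw [Nat.zero_add, Nat.add_zero, Nat.mod_eq_of_lt hi]
  | succ d ih =>
    intro i count f hi hno
    have hn : 0 < q.length := by omega
    have hile : q.getD i 0 ≤ m := by
      have hmem : q.getD i 0 ∈ q := by
        rw [List.getD_eq_getElem?_getD, List.getElem?_eq_getElem hi]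
        exact List.getElem_mem hi
      exact PySem.List.max?_isMax hmax _ hmem
    have hne : q.getD i 0 ≠ m := by
      have := hno 0 (by omega)
      simpa [Nat.mod_eq_of_lt hi] using this
    have hcond : ¬ (PySem.List.pyGetD q (i : Int) 0 ≠ 0 ∧ m ≤ PySem.List.pyGetD q (i : Int) 0) := by
      rw [PySem.List.pyGetD_natCast]
      rw [List.getD_eq_getElem?_getD] at hile hne ⊢
      intro ⟨_, hge⟩
      exact hne (le_antisymm hile hge)
    have hunf : solLoopA location q i count (d + 1 + f) =
        solLoopA location q ((i + 1) % q.length) count (d + f) := by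
      rw [show d + 1 + f = (d + f) + 1 from by omega]
      simp only [solLoopA, hget, hmax, if_pos hv, if_neg hcond]
    rw [hunf]
    rw [ih ((i+1) % q.length) count f (Nat.mod_lt _ hn) (fun t ht => by
      have := hno (t+1) (by omega)
      rw [Nat.mod_add_mod]
      rw [show i + 1 + t = i + (t + 1) from by omega]
      exact this)]
    rw [Nat.mod_add_mod, show i + 1 + d = i + (d + 1) from by omega]

-- zeroing a positive entry strictly decreases the number of positive entries
lemma countP_set_zero_lt (q : List Int) : ∀ (j : Nat), j < q.length →
    0 < q.getD j 0 →
    (q.set j 0).countP (fun x => decide (0 < x)) < q.countP (fun x => decide (0 < x)) := by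
  induction q with
  | nil => intro j hj; simp at hj
  | cons x t ih =>
    intro j hj hpos
    cases j with
    | zero =>
      simp only [List.getD_cons_zero] at hpos
      simp [hpos]
    | succ j =>
      simp only [List.getD_cons_succ] at hpos
      simp only [List.set_cons_succ, List.countP_cons]
      have := ih j (by simpa using hj) hpos
      omega

-- main correspondence: from any matched state the two loops return the same value
lemma loops_agree (location : Int) (n w : Nat) (hn : 0 < n) (hw : w < n)
    (hget : ∀ q' : List Int, q'.length = n → PySem.List.pyGet? q' location = q'[w]?) :
    ∀ (p : Nat) (q : List Int) (i : Nat) (count : Int) (fA fB : Nat),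
      q.length = n → i < n → 0 < q.getD w 0 →
      q.countP (fun x => decide (0 < x)) ≤ p → n * p + 1 ≤ fA → p ≤ fB →
      ∃ r, solLoopA location q i count fA = some r ∧ solLoopB w q i count fB = some r := by
  intro p
  induction p with
  | zero =>
    intro q i count fA fB hq hi hpos hcnt hfA hfB
    exfalso
    have hwq : w < q.length := by omega
    have : 0 < q.countP (fun x => decide (0 < x)) := by
      refine List.countP_pos_iff.mpr ⟨q[w], List.getElem_mem hwq, ?_⟩
      rw [List.getD_eq_getElem?_getD, List.getElem?_eq_getElem hwq] at hpos
      simpa using hpos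
    omega
  | succ p ih =>
    intro q i count fA fB hq hi hpos hcnt hfA hfB
    have hwq : w < q.length := by omega
    have hqw : 0 < q[w] := by
      rw [List.getD_eq_getElem?_getD, List.getElem?_eq_getElem hwq] at hpos
      simpa using hpos
    cases hm : PySem.List.max? q (fun x => x) with
    | none =>
      exfalso
      have : q = [] := (PySem.List.max?_eq_none_iff q _).mp hm
      simp [this] at hq; omega
    | some m =>
      have hmmem : m ∈ q := PySem.List.max?_mem hm
      have hmax_ge : ∀ y ∈ q, y ≤ m := PySem.List.max?_isMax hm
      have hmpos : 0 < m := lt_of_lt_of_le hqw (hmax_ge _ (List.getElem_mem hwq))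
      -- first hit offset d from i
      obtain ⟨jj, hjj, hjjv⟩ := List.mem_iff_getElem.mp hmmem
      have hPex : ∃ t, q.getD ((i + t) % n) 0 = m := by
        refine ⟨(jj + n - i) % n, ?_⟩
        have e1 : (i + (jj + n - i) % n) % n = (i + (jj + n - i)) % n := Nat.add_mod_mod ..
        have e2 : i + (jj + n - i) = jj + n := by omega
        have e3 : (jj + n) % n = jj := by
          rw [Nat.add_mod_right, Nat.mod_eq_of_lt (by omega)]
        rw [e1, e2, e3, List.getD_eq_getElem?_getD, List.getElem?_eq_getElem hjj]
        simpa using hjjv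
      classical
      set d := Nat.find hPex with hd
      have hhit : q.getD ((i + d) % n) 0 = m := Nat.find_spec hPex
      have hno : ∀ t < d, q.getD ((i + t) % n) 0 ≠ m := fun t ht => Nat.find_min hPex ht
      have hdlt : d < n := by
        have : d ≤ (jj + n - i) % n := Nat.find_min' hPex (by
          have e1 : (i + (jj + n - i) % n) % n = (i + (jj + n - i)) % n := Nat.add_mod_mod ..
          have e2 : i + (jj + n - i) = jj + n := by omega
          have e3 : (jj + n) % n = jj := by
            rw [Nat.add_mod_right, Nat.mod_eq_of_lt (by omega)]
          rw [e1, e2, e3, List.getD_eq_getElem?_getD, List.getElem?_eq_getElem hjj]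
          simpa using hjjv)
        have : (jj + n - i) % n < n := Nat.mod_lt _ hn
        omega
      set j := (i + d) % n with hj
      have hjlt : j < n := Nat.mod_lt _ hn
      have hnp : n * (p + 1) = n * p + n := by ring
      obtain ⟨fA1, hfA1⟩ : ∃ f, fA = d + (f + 1) := ⟨fA - d - 1, by omega⟩
      have hgetq : PySem.List.pyGet? q location = some q[w] := by
        rw [hget q hq, List.getElem?_eq_getElem hwq]
      have hvne : q[w] ≠ 0 := by omega
      have hskip : solLoopA location q i count fA =
          solLoopA location q j count (fA1 + 1) := by
        rw [hfA1]
        have := solLoopA_skip location q q[w] m hgetq hvne hm d i count (fA1 + 1)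
          (by omega) (by rw [hq]; exact hno)
        rw [this, hq]
      have hcondj : PySem.List.pyGetD q (j : Int) 0 ≠ 0 ∧ m ≤ PySem.List.pyGetD q (j : Int) 0 := by
        rw [PySem.List.pyGetD_natCast]
        constructor
        · rw [hhit]; omega
        · rw [hhit]
      have hAstep : solLoopA location q j count (fA1 + 1) =
          solLoopA location (q.set j 0) ((j + 1) % q.length) (count + 1) fA1 := by
        simp only [solLoopA, hgetq, hm, if_pos hvne, if_pos hcondj, PySem.List.pySetD_natCast]
      obtain ⟨fB1, hfB1⟩ : ∃ f, fB = f + 1 := ⟨fB - 1, by omega⟩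
      have hfind : findFrom q m q.length i q.length = some j := by
        rw [hq]
        exact findFrom_hit q m n d i n hdlt hno hhit
      have hBstep : solLoopB w q i count fB =
          if j = w then some (count + 1)
          else solLoopB w (q.set j 0) ((j + 1) % q.length) (count + 1) fB1 := by
        rw [hfB1]
        simp only [solLoopB, hm, hfind, PySem.List.pySetD_natCast]
      by_cases hjw : j = w
      · -- the target is executed now: A's next check sees q[location] == 0
        refine ⟨count + 1, ?_, ?_⟩
        · rw [hskip, hAstep]
          obtain ⟨fA2, hfA2⟩ : ∃ f, fA1 = f + 1 := ⟨fA1 - 1, by omega⟩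
          have hget0 : PySem.List.pyGet? (q.set j 0) location = some 0 := by
            rw [hget (q.set j 0) (by simpa using hq), hjw]
            rw [List.getElem?_set_self (by omega)]
          rw [hfA2]
          simp only [solLoopA, hget0]
          simp
        · rw [hBstep, if_pos hjw]
      · -- recurse on the state with one fewer positive entry
        have hlen' : (q.set j 0).length = n := by simpa using hq
        have hpos' : 0 < (q.set j 0).getD w 0 := by
          rw [List.getD_eq_getElem?_getD, List.getElem?_set_ne (by omega)]
          rw [List.getElem?_eq_getElem hwq]
          simpa using hqw
        have hcnt' : (q.set j 0).countP (fun x => decide (0 < x)) ≤ p := by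
          have := countP_set_zero_lt q j (by omega) (by rw [hhit]; omega)
          omega
        obtain ⟨r, hrA, hrB⟩ := ih (q.set j 0) ((j + 1) % q.length) (count + 1) fA1 fB1
          hlen' (by rw [hq]; exact Nat.mod_lt _ hn) hpos' hcnt' (by omega) (by omega)
        refine ⟨r, ?_, ?_⟩
        · rw [hskip, hAstep, hrA]
        · rw [hBstep, if_neg hjw, hrB]

-- ===== VERDICT (by name: the statement is the Claim_ definition above) =====
theorem solution_spec : Claim_equal_solution := by
  intro priorities location _ hpre
  obtain ⟨hne, hinr, hge0⟩ := hpre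
  unfold Spec_solution
  obtain ⟨w, hw, hmod, hget⟩ := pyGet_wrap priorities location hinr
  have hn : 0 < priorities.length := List.length_pos_iff.mpr hne
  have hval : PySem.List.pyGetD priorities location 0 = priorities.getD w 0 := by
    simp only [PySem.List.pyGetD, hget priorities rfl, List.getD_eq_getElem?_getD]
  have hnz : (priorities.length : Int) ≠ 0 := by exact_mod_cast hn.ne'
  have hmodsome : PySem.Int.mod? location (priorities.length : Int) =
      some (PySem.Int.mod location (priorities.length : Int)) := by
    simp [PySem.Int.mod?, PySem.Int.mod, hne]
  simp only [solution, solution_alt, hmodsome, hmod, PySem.List.pyGetD_natCast]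
  by_cases h0 : priorities.getD w 0 = 0
  · rw [if_pos h0]
    obtain ⟨f, hf⟩ : ∃ f, (priorities.length + 1) * (priorities.length + 1) = f + 1 := by
      refine ⟨(priorities.length + 1) * (priorities.length + 1) - 1, ?_⟩
      have : 0 < (priorities.length + 1) * (priorities.length + 1) := by positivity
      omega
    have hget0 : PySem.List.pyGet? priorities location = some 0 := by
      rw [hget priorities rfl]
      rw [List.getD_eq_getElem?_getD, List.getElem?_eq_getElem hw] at h0
      rw [List.getElem?_eq_getElem hw]
      simpa using h0
    rw [hf]
    simp only [solLoopA, hget0]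
    simp
  · rw [if_neg h0]
    have hpos : 0 < priorities.getD w 0 := by
      rw [hval] at hge0
      omega
    have hexp : (priorities.length + 1) * (priorities.length + 1) =
        priorities.length * priorities.length + 2 * priorities.length + 1 := by ring
    obtain ⟨r, hA, hB⟩ := loops_agree location priorities.length w hn hw hget
      priorities.length priorities 0 0
      ((priorities.length + 1) * (priorities.length + 1)) (priorities.length + 1)
      rfl hn hpos List.countP_le_length (by omega) (by omega)
    rw [hA, hB]
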